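-- pv_equiv track=rewrite | github.com/daniel-reich/turbo-robot | HaMCeHeJkaWvMg7LS_20.py | sun_loungers
-- ===== SOURCE A (Python) =====
-- def sun_loungers(beach):
--   count = 0
--   beach = list(beach)
--   for i in range(len(beach)):
--     if beach[i]=='0':
--       left = beach[max(i-1,0)]
--       right = beach[min(i+1,len(beach)-1)]
--       if left==right=='0':
--         count+=1
--         beach[i] = '1'
--   return count
-- ===== SOURCE B (Python) =====
-- def sun_loungers(beach):
--     total = 0
--     run = 0
--     start = True  # does the current (or next, if run==0) run of '0's touch the left end?
--     for c in beach:
--         if c == '0':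
--             run += 1
--         else:
--             if run:
--                 total += (run - 1 + (1 if start else 0)) // 2
--             run = 0
--             start = False
--     if run:
--         total += (run + (1 if start else 0)) // 2
--     return total
-- ===== Notes on version B (the rewrite author's own statement) =====
-- stated objective: alternative
-- what changed: Replaces A's index loop with clamped neighbour lookups and in-place mutation of the beach list by a single pass that accumulates run lengths of '0's and adds a closed-form count (run-1+edge_touches)//2 per run, using O(1) extra space and no mutation.
import Mathlib
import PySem

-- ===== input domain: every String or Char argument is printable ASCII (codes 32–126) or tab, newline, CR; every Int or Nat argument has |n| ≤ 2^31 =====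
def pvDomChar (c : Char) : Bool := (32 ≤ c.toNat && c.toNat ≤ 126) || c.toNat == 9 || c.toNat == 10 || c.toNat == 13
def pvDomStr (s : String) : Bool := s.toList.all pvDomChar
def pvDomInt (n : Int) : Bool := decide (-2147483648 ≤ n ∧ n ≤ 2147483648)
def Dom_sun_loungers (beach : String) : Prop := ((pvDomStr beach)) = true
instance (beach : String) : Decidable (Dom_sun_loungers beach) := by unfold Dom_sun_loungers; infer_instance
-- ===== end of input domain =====

-- B replaces A's clamped-neighbour greedy pass with in-place mutation by a run-length
-- scan adding a closed-form count per maximal run of '0's (alternative decomposition).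

-- ===== PORT A =====
-- One loop step of A: i is the current index, st = (count, beach-list); all index
-- accesses use PySem.pyGet? (the 'none' branches are unreachable: Python raises no
-- IndexError here since every index is clamped into range).
def pvStepA (n : Int) (st : Int × List Char) (i : Int) : Int × List Char :=
  match PySem.List.pyGet? st.2 i with
  | none => st
  | some c =>
    if c == '0' then
      match PySem.List.pyGet? st.2 (max (i-1) 0), PySem.List.pyGet? st.2 (min (i+1) (n-1)) with
      | some left, some right =>
          if left == right && right == '0' then (st.1 + 1, PySem.List.pySetD st.2 i '1') else st
      | _, _ => st
    else st

def sun_loungers (beach : String) : Int :=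
  let b := beach.toList
  ((PySem.List.pyRange 0 (b.length : Int) 1).foldl (pvStepA (b.length : Int)) ((0 : Int), b)).1

-- ===== PORT B =====
-- One loop step of B: st = (total, run, start); run counts the current run of '0's,
-- start says whether that run (or the next one, if run = 0) touches the left end.
def pvStepB (st : Int × Int × Bool) (c : Char) : Int × Int × Bool :=
  if c == '0' then (st.1, st.2.1 + 1, st.2.2)
  else ((if st.2.1 ≠ 0 then st.1 + PySem.Int.floordiv (st.2.1 - 1 + (if st.2.2 then 1 else 0)) 2 else st.1), 0, false)

def sun_loungers_alt (beach : String) : Int :=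
  let st := beach.toList.foldl pvStepB ((0 : Int), (0 : Int), true)
  if st.2.1 ≠ 0 then st.1 + PySem.Int.floordiv (st.2.1 + (if st.2.2 then 1 else 0)) 2 else st.1

-- ===== PRECONDITION & SPEC =====
def Spec_sun_loungers (beach : String) (out : Int) : Prop := out = sun_loungers_alt beach
instance (beach : String) (out : Int) : Decidable (Spec_sun_loungers beach out) := by unfold Spec_sun_loungers; infer_instance

-- ===== CLAIM (what is proved, stated in full; the proofs are below) =====
def Claim_equal_sun_loungers : Prop := ∀ (beach : String), Dom_sun_loungers beach → Spec_sun_loungers beach (sun_loungers beach)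

-- ===== LEMMAS AND PROOFS =====

-- Reference recursion for A: p = "the effective left neighbour is '0'".
def pvG : List Char → Bool → Int
  | [], _ => 0
  | c :: rest, p =>
      if (c == '0') && p && ((rest.head?.getD '0') == '0')
      then 1 + pvG rest false else pvG rest (c == '0')

-- Reference recursion for B: r = pending run length, s = run touches left end.
def pvS : List Char → Nat → Bool → Int
  | [], r, s => if r ≠ 0 then (((r + (if s then 1 else 0)) / 2 : Nat) : Int) else 0
  | c :: l, r, s =>
      if c == '0' then pvS l (r+1) s
      else (if r ≠ 0 then (((r - 1 + (if s then 1 else 0)) / 2 : Nat) : Int) else 0) + pvS l 0 false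

def pvPrev (done : List Char) : Bool := (done.getLast?.getD '0') == '0'

lemma pv_stepA_eval (n count : Int) (b : List Char) (i : Int) (c l r : Char)
    (h1 : PySem.List.pyGet? b i = some c) (hc : (c == '0') = true)
    (h2 : PySem.List.pyGet? b (max (i-1) 0) = some l)
    (h3 : PySem.List.pyGet? b (min (i+1) (n-1)) = some r) :
    pvStepA n (count, b) i
      = if l == r && r == '0' then (count + 1, PySem.List.pySetD b i '1') else (count, b) := by
  simp [pvStepA, h1, h2, h3, hc]

lemma pv_stepA_skip (n count : Int) (b : List Char) (i : Int) (c : Char)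
    (h1 : PySem.List.pyGet? b i = some c) (hc : (c == '0') = false) :
    pvStepA n (count, b) i = (count, b) := by
  simp [pvStepA, h1, hc]

lemma pv_left (done rest : List Char) (hd : done ≠ []) :
    PySem.List.pyGet? (done ++ rest) ((done.length - 1 : Nat) : Int) = some (done.getLast?.getD '0') := by
  rw [PySem.List.pyGet?_natCast]
  rw [List.getElem?_append_left (by have := List.length_pos_iff.mpr hd; omega)]
  rw [← List.getLast?_eq_getElem?]
  cases h : done.getLast? with
  | none => exact absurd (List.getLast?_eq_none_iff.mp h) hd
  | some a => simp

lemma pv_setD (done rest : List Char) (c x : Char) :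
    PySem.List.pySetD (done ++ c :: rest) ((done.length : Nat) : Int) x = done ++ x :: rest := by
  rw [PySem.List.pySetD_natCast]
  induction done with
  | nil => simp
  | cons d ds ih => simp [ih]

lemma pv_invA (rest : List Char) : ∀ (done : List Char) (count : Int),
    ((PySem.List.pyRange (done.length : Int) ((done.length + rest.length : Nat) : Int) 1).foldl
        (pvStepA ((done.length + rest.length : Nat) : Int)) (count, done ++ rest)).1
      = count + pvG rest (pvPrev done) := by
  induction rest with
  | nil =>
      intro done count
      rw [PySem.List.pyRange_one_eq_nil (by simp)]
      simp [pvG]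
  | cons c rest ih =>
      intro done count
      have hlt : ((done.length : Nat) : Int) < ((done.length + (c :: rest).length : Nat) : Int) := by
        simp
      rw [PySem.List.pyRange_one_cons hlt]
      have hget : PySem.List.pyGet? (done ++ c :: rest) ((done.length : Nat) : Int) = some c :=
        PySem.List.pyGet?_append_length ..
      have hk1 : ∀ x : Char, ((done.length : Nat) : Int) + 1 = (((done ++ [x]).length : Nat) : Int) := by
        intro x; simp
      have hN1 : ∀ x : Char, ((done.length + (c :: rest).length : Nat) : Int)
          = (((done ++ [x]).length + rest.length : Nat) : Int) := by
        intro x; simp; omega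
      by_cases hc : c = '0'
      · subst hc
        -- effective left neighbour: the beach start acts as a '0' wall-free side
        have hleft : PySem.List.pyGet? (done ++ '0' :: rest) (max (((done.length : Nat) : Int) - 1) 0)
            = some (done.getLast?.getD '0') := by
          rcases List.eq_nil_or_concat' done with h | ⟨ds, d, h⟩
          · subst h; simpa [PySem.List.pyGet?] using hget
          · have hd : done ≠ [] := by subst h; simp
            have hmax : max (((done.length : Nat) : Int) - 1) 0 = ((done.length - 1 : Nat) : Int) := by
              have := List.length_pos_iff.mpr hd; push_cast [this]; omega
            rw [hmax]; exact pv_left done ('0' :: rest) hd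
        rcases rest with _ | ⟨d, rest'⟩
        · -- last cell of the beach: the clamped right neighbour is the cell itself
          have hmin : min (((done.length : Nat) : Int) + 1)
              (((done.length + (['0'] : List Char).length : Nat) : Int) - 1) = ((done.length : Nat) : Int) := by
            push_cast; simp only [List.length_singleton]; push_cast; omega
          have hright : PySem.List.pyGet? (done ++ ['0'])
              (min (((done.length : Nat) : Int) + 1)
                (((done.length + (['0'] : List Char).length : Nat) : Int) - 1)) = some '0' := by
            rw [hmin]; simpa using hget
          rw [List.foldl_cons, pv_stepA_eval _ _ _ _ _ _ _ hget (by decide) hleft hright]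
          by_cases hp : done.getLast?.getD '0' = '0'
          · rw [if_pos (by simp [hp])]
            rw [show PySem.List.pySetD (done ++ ['0']) ((done.length : Nat) : Int) '1' = done ++ ['1'] from
              pv_setD done [] '0' '1']
            rw [hN1 '1', hk1 '1']
            have h2 := ih (done ++ ['1']) (count + 1)
            simp only [List.append_nil] at h2 ⊢
            rw [h2]
            simp only [pvG, pvPrev, List.getLast?_concat, Option.getD_some, hp]
            norm_num
          · rw [if_neg (by simp [hp])]
            rw [hN1 '0', hk1 '0']
            have h2 := ih (done ++ ['0']) count
            simp only [List.append_nil] at h2 ⊢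
            rw [h2]
            simp only [pvG, pvPrev, List.getLast?_concat, Option.getD_some]
            simp [hp]
        · -- the run has a real right neighbour d
          have hmin : min (((done.length : Nat) : Int) + 1)
              (((done.length + (('0' :: d :: rest') : List Char).length : Nat) : Int) - 1)
              = ((done.length + 1 : Nat) : Int) := by
            push_cast [List.length_cons]; omega
          have hright : PySem.List.pyGet? (done ++ '0' :: d :: rest')
              (min (((done.length : Nat) : Int) + 1)
                (((done.length + (('0' :: d :: rest') : List Char).length : Nat) : Int) - 1)) = some d := by
            rw [hmin, PySem.List.pyGet?_natCast]
            rw [List.getElem?_append_right (by simp)]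
            simp
          rw [List.foldl_cons, pv_stepA_eval _ _ _ _ _ _ _ hget (by decide) hleft hright]
          by_cases hp : done.getLast?.getD '0' = '0' <;> by_cases hd : d = '0'
          · -- both neighbours '0': a lounger is placed
            rw [if_pos (by simp [hp, hd])]
            rw [show PySem.List.pySetD (done ++ '0' :: d :: rest') ((done.length : Nat) : Int) '1'
                = done ++ '1' :: d :: rest' from pv_setD done (d :: rest') '0' '1']
            rw [hN1 '1', hk1 '1']
            have h2 := ih (done ++ ['1']) (count + 1)
            rw [List.append_assoc] at h2
            simp only [List.singleton_append] at h2
            rw [h2]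
            simp [pvG, pvPrev, hp, hd]
            ring
          · rw [if_neg (by simp [hd])]
            rw [hN1 '0', hk1 '0']
            have h2 := ih (done ++ ['0']) count
            rw [List.append_assoc] at h2
            simp only [List.singleton_append] at h2
            rw [h2]
            simp only [pvG, pvPrev, List.getLast?_concat, Option.getD_some]
            simp [hd]
          · rw [if_neg (by simp [hp, hd])]
            rw [hN1 '0', hk1 '0']
            have h2 := ih (done ++ ['0']) count
            rw [List.append_assoc] at h2
            simp only [List.singleton_append] at h2
            rw [h2]
            simp only [pvG, pvPrev, List.getLast?_concat, Option.getD_some]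
            simp [hp]
          · rw [if_neg (by simp [hd])]
            rw [hN1 '0', hk1 '0']
            have h2 := ih (done ++ ['0']) count
            rw [List.append_assoc] at h2
            simp only [List.singleton_append] at h2
            rw [h2]
            simp only [pvG, pvPrev, List.getLast?_concat, Option.getD_some]
            simp [hd]
      · -- c is not '0': nothing happens at this index
        rw [List.foldl_cons, pv_stepA_skip _ _ _ _ _ hget (by simp [hc])]
        rw [hN1 c, hk1 c]
        have h2 := ih (done ++ [c]) count
        rw [List.append_assoc] at h2
        simp only [List.singleton_append] at h2
        rw [h2]
        simp only [pvG, pvPrev, List.getLast?_concat, Option.getD_some]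
        simp [hc]

lemma pv_G_end (r : Nat) : ∀ (s : Bool),
    pvG (List.replicate r '0') s
      = (if r ≠ 0 then (((r + (if s then 1 else 0)) / 2 : Nat) : Int) else 0) := by
  induction r with
  | zero => intro s; simp [pvG]
  | succ r ih =>
      intro s
      have hhead : (((List.replicate r '0').head?.getD '0') == '0') = true := by
        cases r <;> simp [List.replicate_succ]
      rw [List.replicate_succ, pvG, hhead]
      cases s
      · rw [if_neg (by simp), show (('0' : Char) == '0') = true from rfl, ih true]
        norm_num
        all_goals (try split_ifs)
        all_goals (try push_cast)
        all_goals omega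
      · rw [if_pos (by simp), ih false]
        norm_num
        all_goals (try split_ifs)
        all_goals (try push_cast)
        all_goals omega

lemma pv_G_wall (r : Nat) : ∀ (s : Bool) (c : Char) (rest : List Char), (c == '0') = false →
    pvG (List.replicate r '0' ++ c :: rest) s
      = (if r ≠ 0 then (((r - 1 + (if s then 1 else 0)) / 2 : Nat) : Int) else 0) + pvG rest false := by
  induction r with
  | zero =>
      intro s c rest hc
      simp [pvG, hc]
  | succ r ih =>
      intro s c rest hc
      have hhead : (((List.replicate r '0' ++ c :: rest).head?.getD '0') == '0') = decide (r ≠ 0) := by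
        cases r
        · simpa using hc
        · simp [List.replicate_succ]
      rw [List.replicate_succ, List.cons_append, pvG, hhead]
      rcases r with _ | r'
      · -- exactly one pending '0' before the wall: no lounger fits here
        rw [show (decide ((0:Nat) ≠ 0)) = false from rfl]
        rw [if_neg (by simp)]
        rw [show (('0' : Char) == '0') = true from rfl]
        have h0 := ih true c rest hc
        simp only [List.replicate, List.nil_append] at h0 ⊢
        rw [h0]
        cases s <;> norm_num
      · cases s
        · rw [if_neg (by simp), show (('0' : Char) == '0') = true from rfl, ih true c rest hc]
          norm_num
          all_goals (try split_ifs)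
          all_goals (try push_cast)
          all_goals omega
        · rw [if_pos (by simp), ih false c rest hc]
          norm_num
          all_goals (try split_ifs)
          all_goals (try push_cast)
          all_goals omega

lemma pv_G_S (l : List Char) : ∀ (r : Nat) (s : Bool),
    pvG (List.replicate r '0' ++ l) s = pvS l r s := by
  induction l with
  | nil =>
      intro r s
      simpa [pvS] using pv_G_end r s
  | cons c l ih =>
      intro r s
      by_cases hc : (c == '0') = true
      · have hc' : c = '0' := by simpa using hc
        subst hc'
        have h : List.replicate r '0' ++ '0' :: l = List.replicate (r+1) '0' ++ l := by
          simp [List.replicate_succ']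
        rw [h, ih (r+1) s]
        simp [pvS]
      · rw [pv_G_wall r s c l (by simpa using hc)]
        have := ih 0 false
        simp only [List.replicate, List.nil_append] at this
        rw [this]
        simp [pvS, hc]

lemma pv_altS (l : List Char) : ∀ (T : Int) (r : Nat) (s : Bool),
    (let st := l.foldl pvStepB (T, (r : Int), s);
      if st.2.1 ≠ 0 then st.1 + PySem.Int.floordiv (st.2.1 + (if st.2.2 then 1 else 0)) 2 else st.1)
      = T + pvS l r s := by
  induction l with
  | nil =>
      intro T r s
      simp only [List.foldl_nil, pvS]
      by_cases hr : r = 0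
      · subst hr; simp
      · have hr' : ((r : Int)) ≠ 0 := by exact_mod_cast hr
        rw [if_pos hr', if_pos hr]
        rw [PySem.Int.floordiv_eq_ediv_of_pos (by norm_num)]
        cases s <;> norm_num <;> omega
  | cons c l ih =>
      intro T r s
      by_cases hc : (c == '0') = true
      · have h : pvStepB (T, (r : Int), s) c = (T, ((r + 1 : Nat) : Int), s) := by
          simp [pvStepB, hc]
        simp only [List.foldl_cons, h, ih]
        simp [pvS, hc]
      · by_cases hr : r = 0
        · subst hr
          have h : pvStepB (T, ((0 : Nat) : Int), s) c = (T, ((0 : Nat) : Int), false) := by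
            simp [pvStepB, hc]
          simp only [List.foldl_cons, h, ih]
          simp [pvS, hc]
        · have h : pvStepB (T, (r : Int), s) c
              = (T + PySem.Int.floordiv ((r : Int) - 1 + (if s then 1 else 0)) 2, ((0 : Nat) : Int), false) := by
            simp [pvStepB, hc, hr]
          simp only [List.foldl_cons, h, ih]
          rw [PySem.Int.floordiv_eq_ediv_of_pos (by norm_num)]
          have h2 : ((r : Int) - 1 + (if s then 1 else 0)) / 2
              = ((((r - 1 + (if s then 1 else 0)) / 2 : Nat)) : Int) := by
            cases s <;> norm_num <;> omega
          rw [h2]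
          simp [pvS, hc, hr]
          ring

-- ===== VERDICT (by name: the statement is the Claim_ definition above) =====
theorem sun_loungers_spec : Claim_equal_sun_loungers := by
  unfold Claim_equal_sun_loungers
  intro beach _
  unfold Spec_sun_loungers sun_loungers sun_loungers_alt
  have hA := pv_invA beach.toList [] 0
  simp only [List.length_nil, List.nil_append, Nat.zero_add, Nat.cast_zero, zero_add] at hA
  have hGS := pv_G_S beach.toList 0 true
  simp only [List.replicate, List.nil_append] at hGS
  have hB := pv_altS beach.toList 0 0 true
  simp only [Nat.cast_zero, zero_add] at hB
  simp only [hA, pvPrev, List.getLast?_nil, Option.getD_none]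
  rw [show (('0' : Char) == '0') = true from rfl] at *
  rw [hGS, ← hB]
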